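-- pv_equiv track=rewrite | github.com/osvaldolimah/automacao-forms | main-melhor.py | ordenar_rotas_por_preferencia
-- ===== SOURCE A (Python) =====
-- import unicodedata
-- from typing import List, Optional
--
-- BAIRROS_PREFERIDOS = [
--     "Parque Iracema",
--     "Cajazeiras",
--     "Cambeba",
--     "Damas",
--     "Itaperi",
--     "Guararapes",
--     "Luciano Cavalcante"
-- ]
--
-- def ordenar_rotas_por_preferencia(rotas: List[str]) -> List[str]:
--     """
--     Reordena as rotas encontradas de acordo com a preferencia definida em BAIRROS_PREFERIDOS.
--     Bairros nao listados em BAIRROS_PREFERIDOS sao colocados no final.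
--
--     Args:
--         rotas: Lista de rotas encontradas
--
--     Returns:
--         Lista de rotas reordenada por preferencia
--     """
--     rotas_preferidas = []
--     rotas_restantes = []
--
--     # Normalizar os bairros preferidos para comparacao
--     bairros_pref_normalizados = {remover_acentos(b): b for b in BAIRROS_PREFERIDOS}
--
--     # Separar rotas: preferidas vs restantes
--     for rota in rotas:
--         rota_normalizada = remover_acentos(rota)
--         # Verificar se algum bairro preferido esta na rota
--         encontrou_preferido = False
--         for bairro_pref_norm, bairro_pref_original in bairros_pref_normalizados.items():
--             if bairro_pref_norm in rota_normalizada: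
--                 rotas_preferidas.append((BAIRROS_PREFERIDOS.index(bairro_pref_original), rota))
--                 encontrou_preferido = True
--                 break
--
--         if not encontrou_preferido:
--             rotas_restantes.append(rota)
--
--     # Ordenar rotas preferidas pela ordem em BAIRROS_PREFERIDOS
--     rotas_preferidas.sort(key=lambda x: x[0])
--     resultado = [rota for _, rota in rotas_preferidas] + rotas_restantes
--
--     return resultado
--
-- def remover_acentos(texto: str) -> str:
--     """
--     Normaliza o texto removendo acentos e convertendo para minúsculas.
--
--     Args:
--         texto: String a normalizar
--
--     Returns:
--         String normalizada sem acentos e em minúsculas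
--     """
--     if not texto:
--         return ""
--     nfkd_form = unicodedata.normalize('NFKD', texto)
--     return "".join([c for c in nfkd_form if not unicodedata.combining(c)]).lower().strip()
-- ===== SOURCE B (Python) =====
-- import unicodedata
-- from typing import List
--
-- BAIRROS_PREFERIDOS = [
--     "Parque Iracema",
--     "Cajazeiras",
--     "Cambeba",
--     "Damas",
--     "Itaperi",
--     "Guararapes",
--     "Luciano Cavalcante"
-- ]
--
-- def _normalizar(texto: str) -> str:
--     nfkd = unicodedata.normalize('NFKD', texto)
--     return "".join(c for c in nfkd if not unicodedata.combining(c)).lower().strip()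
--
-- def ordenar_rotas_por_preferencia(rotas: List[str]) -> List[str]:
--     # Bucket pass: key = first preferred neighborhood (by list order) whose
--     # normalized name occurs in the normalized route, else len(prefs).
--     prefs = [_normalizar(b) for b in BAIRROS_PREFERIDOS]
--     def chave(rota):
--         rn = _normalizar(rota)
--         return next((i for i, p in enumerate(prefs) if p in rn), len(prefs))
--     com_chave = [(chave(r), r) for r in rotas]
--     return [r for i in range(len(prefs) + 1) for k, r in com_chave if k == i]
-- ===== Notes on version B (the rewrite author's own statement) =====
-- stated objective: simpler
-- what changed: Replaces the two-bucket partition with an index-tagged list plus a sort by a single bucketed selection: each route gets the index of the first matching preferred neighborhood (sentinel len(prefs) if none), and the output is the concatenation of the buckets in index order.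
import Mathlib
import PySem

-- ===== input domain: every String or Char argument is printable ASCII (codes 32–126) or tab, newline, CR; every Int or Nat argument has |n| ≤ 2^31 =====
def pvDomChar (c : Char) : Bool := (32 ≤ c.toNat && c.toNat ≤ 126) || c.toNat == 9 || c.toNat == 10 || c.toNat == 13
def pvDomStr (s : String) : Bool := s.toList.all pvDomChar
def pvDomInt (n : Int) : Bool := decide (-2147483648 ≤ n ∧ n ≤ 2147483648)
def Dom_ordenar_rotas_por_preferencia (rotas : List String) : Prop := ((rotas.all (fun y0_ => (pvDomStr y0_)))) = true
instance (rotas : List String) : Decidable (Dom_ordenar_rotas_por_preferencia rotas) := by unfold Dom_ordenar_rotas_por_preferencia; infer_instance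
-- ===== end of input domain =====

-- B replaces A's partition + stable sort + concatenation by a single keyed bucket
-- pass (key = first matching preferred index, sentinel 7 when none), concatenating
-- the buckets in key order; objective: simpler.

-- ===== PORT A =====
def BAIRROS_PREFERIDOS : List String :=
  ["Parque Iracema", "Cajazeiras", "Cambeba", "Damas", "Itaperi", "Guararapes",
   "Luciano Cavalcante"]

-- exact on the ASCII domain: NFKD is the identity there and no ASCII character is
-- combining, so remover_acentos is .lower().strip()
def remover_acentos (texto : String) : String :=
  if texto == "" then "" else PySem.Str.strip (PySem.Str.lower texto)

-- the inner 'for bairro_pref_norm, bairro_pref_original in ….items(): if … in …: …; break'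
def innerFind (items : List (String × String)) (rn : String) : Option String :=
  match items with
  | [] => none
  | (bn, bo) :: t => if PySem.Str.isIn bn rn then some bo else innerFind t rn

-- one iteration of the 'for rota in rotas' loop
-- (.index never raises here: the looked-up value always comes from BAIRROS_PREFERIDOS)
def stepA (st : List (Nat × String) × List String) (rota : String) :
    List (Nat × String) × List String :=
  let rn := remover_acentos rota
  match innerFind (PySem.Dict.items
      (BAIRROS_PREFERIDOS.foldl
        (fun d b => PySem.Dict.insert d (remover_acentos b) b) PySem.Dict.empty)) rn with
  | some bo => (st.1 ++ [((PySem.List.index? BAIRROS_PREFERIDOS bo).getD 0, rota)], st.2)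
  | none => (st.1, st.2 ++ [rota])

def ordenar_rotas_por_preferencia (rotas : List String) : List String :=
  let st := rotas.foldl stepA ([], [])
  (PySem.List.sorted st.1 (fun x => x.1) false).map Prod.snd ++ st.2

-- ===== PORT B =====
def normalizar (texto : String) : String := PySem.Str.strip (PySem.Str.lower texto)

-- next((i for i, p in enumerate(prefs) if p in rn), len(prefs))
def firstIdx (prefs : List String) (rn : String) : Nat :=
  match prefs with
  | [] => 0
  | p :: t => if PySem.Str.isIn p rn then 0 else firstIdx t rn + 1

def chave (prefs : List String) (rota : String) : Nat :=
  firstIdx prefs (normalizar rota)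

def ordenar_rotas_por_preferencia_alt (rotas : List String) : List String :=
  let prefs := BAIRROS_PREFERIDOS.map normalizar
  let comChave := rotas.map (fun r => (chave prefs r, r))
  (List.range (prefs.length + 1)).flatMap
    (fun i => (comChave.filter (fun p => p.1 == i)).map Prod.snd)

-- ===== PRECONDITION & SPEC =====
def Spec_ordenar_rotas_por_preferencia (rotas : List String) (out : List String) : Prop := out = ordenar_rotas_por_preferencia_alt rotas
instance (rotas : List String) (out : List String) : Decidable (Spec_ordenar_rotas_por_preferencia rotas out) := by unfold Spec_ordenar_rotas_por_preferencia; infer_instance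

-- ===== CLAIM (what is proved, stated in full; the proofs are below) =====
def Claim_equal_ordenar_rotas_por_preferencia : Prop := ∀ (rotas : List String), Dom_ordenar_rotas_por_preferencia rotas → Spec_ordenar_rotas_por_preferencia rotas (ordenar_rotas_por_preferencia rotas)

-- ===== LEMMAS AND PROOFS =====

def prefsLit : List String :=
  ["parque iracema", "cajazeiras", "cambeba", "damas", "itaperi", "guararapes",
   "luciano cavalcante"]

-- the route key B computes, as a named function for the proofs
def keyf (r : String) : Nat := firstIdx prefsLit (normalizar r)

theorem items_lit : PySem.Dict.items
      (BAIRROS_PREFERIDOS.foldl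
        (fun d b => PySem.Dict.insert d (remover_acentos b) b) PySem.Dict.empty)
    = [("parque iracema", "Parque Iracema"), ("cajazeiras", "Cajazeiras"),
       ("cambeba", "Cambeba"), ("damas", "Damas"), ("itaperi", "Itaperi"),
       ("guararapes", "Guararapes"), ("luciano cavalcante", "Luciano Cavalcante")] := by
  decide

theorem prefs_lit : BAIRROS_PREFERIDOS.map normalizar = prefsLit := by decide

theorem norm_eq (t : String) : remover_acentos t = normalizar t := by
  by_cases h : t = ""
  · subst h; decide
  · simp [remover_acentos, normalizar, h]

theorem firstIdx_le (prefs : List String) (rn : String) :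
    firstIdx prefs rn ≤ prefs.length := by
  induction prefs with
  | nil => simp [firstIdx]
  | cons p t ih =>
    simp only [firstIdx, List.length_cons]
    split
    · omega
    · omega

theorem stepA_eq (st : List (Nat × String) × List String) (rota : String) :
    stepA st rota =
      if keyf rota < 7 then (st.1 ++ [(keyf rota, rota)], st.2)
      else (st.1, st.2 ++ [rota]) := by
  unfold stepA
  rw [items_lit, norm_eq]
  simp only [keyf, prefsLit, innerFind, firstIdx]
  split_ifs <;> simp_all <;> decide

theorem foldA (rotas : List String) (a1 : List (Nat × String)) (a2 : List String) :
    rotas.foldl stepA (a1, a2) =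
      (a1 ++ (rotas.map (fun r => (keyf r, r))).filter (fun p => decide (p.1 < 7)),
       a2 ++ rotas.filter (fun r => decide (¬ keyf r < 7))) := by
  induction rotas generalizing a1 a2 with
  | nil => simp
  | cons r t ih =>
    simp only [List.foldl_cons, stepA_eq]
    by_cases h : keyf r < 7 <;>
      simp [h, ih, List.filter_cons, List.append_assoc]

theorem insertBy_split {α : Type} (before : α → α → Bool) (x : α) (L1 L2 : List α)
    (h1 : ∀ y ∈ L1, before x y = false) (h2 : ∀ y ∈ L2, before x y = true) :
    PySem.List.insertBy before x (L1 ++ L2) = L1 ++ x :: L2 := by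
  induction L1 with
  | nil =>
    cases L2 with
    | nil => simp [PySem.List.insertBy]
    | cons hd t => simp [PySem.List.insertBy, h2 hd (by simp)]
  | cons a t ih =>
    simp only [List.cons_append, PySem.List.insertBy, h1 a (by simp)]
    simp [ih (fun y hy => h1 y (by simp [hy]))]

theorem flatMap_congr' {α β : Type} (l : List α) (f g : α → List β)
    (h : ∀ a ∈ l, f a = g a) : l.flatMap f = l.flatMap g := by
  induction l with
  | nil => rfl
  | cons a t ih =>
    simp only [List.flatMap_cons, h a (by simp),
      ih (fun b hb => h b (by simp [hb]))]

theorem map_flatMap' {α β γ : Type} (l : List α) (f : α → List β) (g : β → γ) :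
    (l.flatMap f).map g = l.flatMap (fun a => (f a).map g) := by
  induction l with
  | nil => rfl
  | cons a t ih => simp [ih]

theorem filter_filter_sub {α : Type} (p q : α → Bool) (l : List α)
    (h : ∀ a, q a = true → p a = true) : (l.filter p).filter q = l.filter q := by
  induction l with
  | nil => rfl
  | cons a t ih =>
    by_cases hp : p a = true
    · simp [List.filter_cons, hp, ih]
    · have hq : q a = false := by
        cases hqa : q a
        · rfl
        · exact absurd (h a hqa) (by simp [hp])
      simp [hp, hq, ih]

theorem filter_map_snd (rotas : List String) (p : Nat → Bool) :
    ((rotas.map (fun r => (keyf r, r))).filter (fun q => p q.1)).map Prod.snd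
      = rotas.filter (fun r => p (keyf r)) := by
  induction rotas with
  | nil => rfl
  | cons r t ih =>
    by_cases h : p (keyf r) = true <;> simp [h, ih]

theorem insertBy_buckets {α : Type} (key : α → Nat) (x : α) (xs : List α) (N : Nat)
    (hk : key x < N) :
    PySem.List.insertBy (fun a b => decide (key a < key b)) x
        ((List.range N).flatMap (fun i => xs.filter (fun y => key y == i)))
      = (List.range N).flatMap (fun i => (xs ++ [x]).filter (fun y => key y == i)) := by
  have hN : N = (key x + 1) + (N - (key x + 1)) := by omega
  rw [hN, List.range_add, List.range_succ]
  simp only [List.flatMap_append, List.flatMap_map, List.flatMap_singleton]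
  have hA : (List.range (key x)).flatMap
        (fun i => (xs ++ [x]).filter (fun y => key y == i))
      = (List.range (key x)).flatMap (fun i => xs.filter (fun y => key y == i)) := by
    apply flatMap_congr'
    intro i hi
    have hi' : i < key x := List.mem_range.mp hi
    rw [List.filter_append]
    have : (key x == i) = false := by simp; omega
    simp [this]
  have hC : (List.range (N - (key x + 1))).flatMap
        (fun i => (xs ++ [x]).filter (fun y => key y == key x + 1 + i))
      = (List.range (N - (key x + 1))).flatMap
        (fun i => xs.filter (fun y => key y == key x + 1 + i)) := by
    apply flatMap_congr'
    intro i _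
    rw [List.filter_append]
    have : (key x == key x + 1 + i) = false := by simp; omega
    simp [this]
  have hB : (xs ++ [x]).filter (fun y => key y == key x)
      = xs.filter (fun y => key y == key x) ++ [x] := by
    rw [List.filter_append]; simp
  rw [hA, hB, hC, ← List.append_assoc]
  rw [insertBy_split (fun a b => decide (key a < key b)) x
      ((List.range (key x)).flatMap (fun i => xs.filter (fun y => key y == i)) ++
        xs.filter (fun y => key y == key x))
      ((List.range (N - (key x + 1))).flatMap
        (fun i => xs.filter (fun y => key y == key x + 1 + i)))]
  · simp [List.append_assoc]
  · intro y hy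
    rcases List.mem_append.mp hy with hy | hy
    · obtain ⟨i, hi, hyi⟩ := List.mem_flatMap.mp hy
      have h1 : key y = i := by simpa using (List.mem_filter.mp hyi).2
      have h2 : i < key x := List.mem_range.mp hi
      simp; omega
    · have h1 : key y = key x := by simpa using (List.mem_filter.mp hy).2
      simp; omega
  · intro y hy
    obtain ⟨i, _, hyi⟩ := List.mem_flatMap.mp hy
    have h1 : key y = key x + 1 + i := by simpa using (List.mem_filter.mp hyi).2
    simp; omega

theorem sorted_buckets {α : Type} (key : α → Nat) (xs : List α) (N : Nat)
    (h : ∀ x ∈ xs, key x < N) :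
    PySem.List.sorted xs key false
      = (List.range N).flatMap (fun i => xs.filter (fun y => key y == i)) := by
  induction xs using List.reverseRecOn with
  | nil => simp [PySem.List.sorted]
  | append_singleton xs x ih =>
    rw [PySem.List.sorted_eq_foldl_insertBy, List.foldl_append,
      ← PySem.List.sorted_eq_foldl_insertBy,
      ih (fun y hy => h y (by simp [hy]))]
    simp only [List.foldl_cons, List.foldl_nil]
    exact insertBy_buckets key x xs N (h x (by simp))

-- ===== VERDICT (by name: the statement is the Claim_ definition above) =====
theorem ordenar_rotas_por_preferencia_spec : Claim_equal_ordenar_rotas_por_preferencia := by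
  intro rotas _
  show ordenar_rotas_por_preferencia rotas = ordenar_rotas_por_preferencia_alt rotas
  unfold ordenar_rotas_por_preferencia ordenar_rotas_por_preferencia_alt
  rw [prefs_lit]
  simp only [foldA rotas [] [], List.nil_append]
  have hkeyfun : (fun r => (chave prefsLit r, r)) = (fun r : String => (keyf r, r)) := rfl
  rw [hkeyfun]
  rw [sorted_buckets (fun p => p.1)
      ((rotas.map (fun r => (keyf r, r))).filter (fun p => decide (p.1 < 7))) 7
      (fun p hp => by simpa using (List.mem_filter.mp hp).2)]
  rw [show prefsLit.length = 7 from rfl]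
  conv_rhs => rw [List.range_succ, List.flatMap_append, List.flatMap_singleton]
  conv_lhs => rw [map_flatMap']
  congr 1
  · apply flatMap_congr'
    intro i hi
    have hi' : i < 7 := List.mem_range.mp hi
    rw [filter_filter_sub (fun p => decide (p.1 < 7)) (fun p => p.1 == i)
      (rotas.map (fun r => (keyf r, r)))
      (fun a ha => by have : a.1 = i := by simpa using ha
                      simp [this]; omega)]
  · rw [filter_map_snd rotas (fun k => k == 7)]
    apply List.filter_congr
    intro r _
    have h7 : keyf r ≤ 7 := by
      simpa using firstIdx_le prefsLit (normalizar r)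
    by_cases hk : keyf r = 7
    · simp [hk]
    · have : keyf r < 7 := by omega
      simp [hk, this]
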